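-- pv_equiv track=rewrite | github.com/linux-of-user/plexichat | src/netlink/app/core/security/ssl_manager.py | _extract_primary_domain
-- ===== SOURCE A (Python) =====
-- def _extract_primary_domain(subject: str) -> str:
--     """Extract primary domain from certificate subject."""
--     try:
--         # Parse the subject string to find CN
--         for part in subject.split(','):
--             if part.strip().startswith('CN='):
--                 return part.strip()[3:]
--         return "localhost"
--     except:
--         return "localhost"
-- ===== SOURCE B (Python) =====
-- def _extract_primary_domain(subject: str) -> str:
--     """Extract primary domain from certificate subject."""
--     try:
--         # Build a table of all attributes (first occurrence wins), then look up CN.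
--         attrs = {}
--         for part in subject.split(','):
--             s = part.strip()
--             i = s.find('=')
--             if i != -1:
--                 attrs.setdefault(s[:i], s[i + 1:])
--         return attrs.get('CN', 'localhost')
--     except:
--         return "localhost"
-- ===== Notes on version B (the rewrite author's own statement) =====
-- stated objective: alternative
-- what changed: B parses the whole subject into a first-wins attribute table (key = text before the first '=') and then looks up 'CN', instead of A's scan with an early return on the first part whose stripped text starts with 'CN='.
import Mathlib
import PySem

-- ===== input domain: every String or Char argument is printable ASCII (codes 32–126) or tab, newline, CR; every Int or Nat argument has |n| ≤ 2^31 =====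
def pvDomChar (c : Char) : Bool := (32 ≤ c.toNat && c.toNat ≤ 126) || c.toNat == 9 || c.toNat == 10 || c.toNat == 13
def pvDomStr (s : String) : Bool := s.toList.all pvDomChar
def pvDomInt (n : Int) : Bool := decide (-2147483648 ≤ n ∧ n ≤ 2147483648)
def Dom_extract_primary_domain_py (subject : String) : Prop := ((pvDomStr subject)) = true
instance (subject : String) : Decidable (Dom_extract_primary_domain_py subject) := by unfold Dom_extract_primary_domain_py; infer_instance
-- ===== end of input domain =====

-- B builds a first-wins attribute table and looks up 'CN' instead of A's early-return scan; same values everywhere (alternative decomposition, not faster).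

-- ===== PORT A =====
-- subject.split(",") = split? with sep "," ≠ "": always some, .getD [] is exact
-- A's loop: return strip(part)[3:] for the first part whose stripped text starts with 'CN='; else "localhost".
def extractLoopA : List String → String
  | [] => "localhost"
  | p :: rest =>
      if PySem.Str.startswith (PySem.Str.strip p) "CN=" then
        PySem.Str.slice (PySem.Str.strip p) (some 3) none
      else extractLoopA rest

def extract_primary_domain_py (subject : String) : String :=
  extractLoopA ((PySem.Str.split? subject ",").getD [])

-- ===== PORT B =====
-- B's loop body: s = part.strip(); i = s.find('='); if i != -1: attrs.setdefault(s[:i], s[i+1:])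
def stepB (d : PySem.Dict String String) (part : String) : PySem.Dict String String :=
  let s := PySem.Str.strip part
  let i := PySem.Str.find s "="
  if i ≠ -1 then d.setdefault (PySem.Str.slice s none (some i)) (PySem.Str.slice s (some (i + 1)) none)
  else d

def extract_primary_domain_py_alt (subject : String) : String :=
  (((PySem.Str.split? subject ",").getD []).foldl stepB PySem.Dict.empty).getD "CN" "localhost"

-- ===== PRECONDITION & SPEC =====
def Spec_extract_primary_domain_py (subject : String) (out : String) : Prop := out = extract_primary_domain_py_alt subject
instance (subject : String) (out : String) : Decidable (Spec_extract_primary_domain_py subject out) := by unfold Spec_extract_primary_domain_py; infer_instance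

-- ===== CLAIM (what is proved, stated in full; the proofs are below) =====
def Claim_equal_extract_primary_domain_py : Prop := ∀ (subject : String), Dom_extract_primary_domain_py subject → Spec_extract_primary_domain_py subject (extract_primary_domain_py subject)

-- ===== LEMMAS AND PROOFS =====

-- the first '=' of a list starting 'C','N','=' is at index 2
lemma findC (t : List Char) : PySem.Chars.find ('C'::'N'::'='::t) ['='] = 2 := by
  set cs := 'C'::'N'::'='::t with hcs
  have hinf : (['='] : List Char) <:+: cs := ⟨['C','N'], t, by simp [hcs]⟩
  have h0 : 0 ≤ PySem.Chars.find cs ['='] := (PySem.Chars.find_nonneg_iff cs ['=']).2 hinf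
  obtain ⟨hpre, hmin⟩ := PySem.Chars.find_spec h0
  set j := PySem.Chars.find cs ['='] with hj
  have h2 : (['='] : List Char) <+: cs.drop 2 := by simp [hcs]
  have hle : j.toNat ≤ 2 := by
    by_contra h; exact hmin 2 (by omega) h2
  interval_cases h : j.toNat
  · exfalso; rcases List.cons_prefix_iff.1 hpre with ⟨l', hl, _⟩; simp [hcs] at hl
  · exfalso; rcases List.cons_prefix_iff.1 hpre with ⟨l', hl, _⟩; simp [hcs] at hl
  · omega

-- converse: first '=' at i ≥ 0 with the text before it equal to "CN" forces shape 'C'::'N'::'='::t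
lemma keyC (cs : List Char) (i : Int) (hfind : PySem.Chars.find cs ['='] = i) (hge : 0 ≤ i)
    (hkey : cs.take i.toNat = ['C','N']) : ∃ t, cs = 'C'::'N'::'='::t := by
  obtain ⟨hpre, hmin⟩ := PySem.Chars.find_spec (hfind ▸ hge)
  rw [hfind] at hpre hmin
  have hlen : min i.toNat cs.length = 2 := by
    have := congrArg List.length hkey; simpa [List.length_take] using this
  have hd : cs.drop i.toNat ≠ [] := by
    intro h; rw [h] at hpre; simp at hpre
  have hlt : i.toNat < cs.length := by
    by_contra h; exact hd (List.drop_eq_nil_of_le (by omega))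
  have hi2 : i.toNat = 2 := by omega
  rw [hi2] at hpre hkey
  rcases List.cons_prefix_iff.1 hpre with ⟨t, ht, _⟩
  refine ⟨t, ?_⟩
  have h3 := List.take_append_drop 2 cs
  rw [hkey, ht] at h3; simpa using h3.symm

-- string-level: if s starts with 'CN=', s.toList has the literal shape
lemma shape_of_startswith (s : String) (h : PySem.Str.startswith s "CN=" = true) :
    ∃ t, s.toList = 'C'::'N'::'='::t := by
  rw [PySem.Str.startswith_eq] at h
  have hp : ("CN=" : String).toList <+: s.toList := (PySem.Chars.startswith_iff _ _).1 h
  have : (['C','N','='] : List Char) <+: s.toList := by simpa using hp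
  rcases this with ⟨t, ht⟩
  exact ⟨t, by simpa using ht.symm⟩

lemma find_eq_two_of_startswith (s : String)
    (h : PySem.Str.startswith s "CN=" = true) :
    PySem.Str.find s "=" = 2 := by
  rcases shape_of_startswith s h with ⟨t, ht⟩
  rw [PySem.Str.find_eq]
  have : ("=" : String).toList = ['='] := by decide
  rw [this, ht]
  exact findC t

lemma startswith_of_key_CN (s : String) (i : Int)
    (hfind : PySem.Str.find s "=" = i) (hge : 0 ≤ i)
    (hkey : PySem.Str.slice s none (some i) = "CN") :
    PySem.Str.startswith s "CN=" = true := by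
  have hkeyl : s.toList.take i.toNat = ['C','N'] := by
    have := congrArg String.toList hkey
    rw [PySem.Str.toList_slice] at this
    simpa [PySem.Chars.slice_eq_listSlice, PySem.List.slice_to s.toList hge] using this
  have hfindl : PySem.Chars.find s.toList ['='] = i := by
    rw [PySem.Str.find_eq] at hfind
    simpa using hfind
  rcases keyC s.toList i hfindl hge hkeyl with ⟨t, ht⟩
  rw [PySem.Str.startswith_eq]
  apply (PySem.Chars.startswith_iff _ _).2
  have hcn : ("CN=" : String).toList = ['C','N','='] := by decide
  rw [ht, hcn]; exact ⟨t, rfl⟩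

-- main loop invariant: B's table lookup after folding equals A's scan, modulo what d already holds
lemma loop_eq (parts : List String) (d : PySem.Dict String String) :
    (parts.foldl stepB d).getD "CN" "localhost" =
      if d.contains "CN" then d.getD "CN" "localhost" else extractLoopA parts := by
  induction parts generalizing d with
  | nil =>
      simp only [List.foldl_nil, extractLoopA]
      split_ifs with hc
      · rfl
      · exact PySem.Dict.getD_of_not_contains d _ (by simpa using hc)
  | cons p rest ih =>
      rw [List.foldl_cons]
      by_cases hsw : PySem.Str.startswith (PySem.Str.strip p) "CN=" = true
      · -- matching part: the table gains (first-wins) the key "CN"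
        have hf2 := find_eq_two_of_startswith _ hsw
        have hkey : PySem.Str.slice (PySem.Str.strip p) none (some 2) = "CN" := by
          rcases shape_of_startswith _ hsw with ⟨t, ht⟩
          apply String.toList_inj.mp
          rw [PySem.Str.toList_slice]
          simp [PySem.Chars.slice_eq_listSlice, PySem.List.slice_to _ (by omega : (0:Int) ≤ 2), ht]
        have hA : extractLoopA (p :: rest) = PySem.Str.slice (PySem.Str.strip p) (some 3) none := by
          simp only [extractLoopA]; rw [if_pos hsw]
        have hstep : stepB d p = d.setdefault "CN" (PySem.Str.slice (PySem.Str.strip p) (some 3) none) := by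
          simp only [stepB]
          rw [hf2, if_pos (by norm_num), hkey]
          norm_num
        rw [hstep, ih, hA]
        by_cases hc : d.contains "CN" = true
        · rw [PySem.Dict.setdefault_of_contains _ _ hc]
          simp [hc]
        · have hc' : d.contains "CN" = false := by simpa using hc
          rw [PySem.Dict.setdefault_of_not_contains _ _ hc']
          simp [PySem.Dict.contains_insert_self, PySem.Dict.getD_insert_self, hc']
      · -- non-matching part: the key "CN" is untouched
        have hsw' : PySem.Str.startswith (PySem.Str.strip p) "CN=" = false := by simpa using hsw
        have hA : extractLoopA (p :: rest) = extractLoopA rest := by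
          simp only [extractLoopA]; rw [if_neg (by rw [hsw']; simp)]
        by_cases hi : PySem.Str.find (PySem.Str.strip p) "=" = -1
        · have hstep : stepB d p = d := by
            simp only [stepB]
            rw [if_neg (by simpa using hi)]
          rw [hstep, ih, hA]
        · set s := PySem.Str.strip p with hs
          set i := PySem.Str.find s "=" with hidef
          have hge : 0 ≤ i := by
            have hm1 : -1 ≤ PySem.Str.find s "=" := by
              rw [PySem.Str.find_eq]; exact PySem.Chars.neg_one_le_find _ _
            omega
          have hkne : ("CN" : String) ≠ PySem.Str.slice s none (some i) := by
            intro h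
            exact hsw (startswith_of_key_CN s i rfl hge h.symm)
          have hstep : stepB d p =
              d.setdefault (PySem.Str.slice s none (some i)) (PySem.Str.slice s (some (i + 1)) none) := by
            simp only [stepB, ← hs, ← hidef]
            rw [if_pos hi]
          rw [hstep, ih, hA]
          have hcont : (d.setdefault (PySem.Str.slice s none (some i)) (PySem.Str.slice s (some (i + 1)) none)).contains "CN" = d.contains "CN" := by
            rw [PySem.Dict.contains_setdefault]
            simp [fun h => hkne (by simpa using h : ("CN":String) = PySem.Str.slice s none (some i))]
          have hget : (d.setdefault (PySem.Str.slice s none (some i)) (PySem.Str.slice s (some (i + 1)) none)).getD "CN" "localhost" = d.getD "CN" "localhost" := by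
            rw [PySem.Dict.getD_eq_get?_getD, PySem.Dict.get?_setdefault_of_ne _ _ hkne, ← PySem.Dict.getD_eq_get?_getD]
          rw [hcont, hget]

-- ===== VERDICT (by name: the statement is the Claim_ definition above) =====
theorem extract_primary_domain_py_spec : Claim_equal_extract_primary_domain_py := by
  intro subject _
  unfold Spec_extract_primary_domain_py extract_primary_domain_py extract_primary_domain_py_alt
  rw [loop_eq]
  simp [PySem.Dict.contains_empty]
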